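-- pv_equiv track=rewrite | github.com/onumashunsuke/finnum3_jrird | src/evaluate/evaluate.py | unmerge_prediction
-- ===== SOURCE A (Python) =====
-- def unmerge_prediction(preds: list, merged_data: list):
--     """unmerge predictions based on merged ids in merged data file.
--     """
--     preds_with_ids = []
--     assert len(preds) == len(merged_data)
--     # unmerge preds with id
--     for (pr, md) in zip(preds, merged_data):
--         for i in md["id"]:
--             preds_with_ids.append((i, pr))
--     # sort by id and return predictions only
--     preds_with_ids.sort(key=lambda x: x[0])
--     return [p for (i, p) in preds_with_ids]
-- ===== SOURCE B (Python) =====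
-- def unmerge_prediction(preds: list, merged_data: list):
--     """unmerge predictions based on merged ids in merged data file.
--     """
--     assert len(preds) == len(merged_data)
--     # bucket predictions by id, preserving encounter order within each id
--     buckets = {}
--     for (pr, md) in zip(preds, merged_data):
--         for i in md["id"]:
--             buckets[i] = buckets.get(i, []) + [pr]
--     # concatenate buckets over sorted unique ids
--     out = []
--     for k in sorted(buckets.keys()):
--         out.extend(buckets[k])
--     return out
-- ===== Notes on version B (the rewrite author's own statement) =====
-- stated objective: alternative
-- what changed: B replaces A's flat (id, pred) pair list plus full stable sort with a dict of id-keyed buckets built in one pass, then concatenates the buckets over the sorted distinct ids.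
import Mathlib
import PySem

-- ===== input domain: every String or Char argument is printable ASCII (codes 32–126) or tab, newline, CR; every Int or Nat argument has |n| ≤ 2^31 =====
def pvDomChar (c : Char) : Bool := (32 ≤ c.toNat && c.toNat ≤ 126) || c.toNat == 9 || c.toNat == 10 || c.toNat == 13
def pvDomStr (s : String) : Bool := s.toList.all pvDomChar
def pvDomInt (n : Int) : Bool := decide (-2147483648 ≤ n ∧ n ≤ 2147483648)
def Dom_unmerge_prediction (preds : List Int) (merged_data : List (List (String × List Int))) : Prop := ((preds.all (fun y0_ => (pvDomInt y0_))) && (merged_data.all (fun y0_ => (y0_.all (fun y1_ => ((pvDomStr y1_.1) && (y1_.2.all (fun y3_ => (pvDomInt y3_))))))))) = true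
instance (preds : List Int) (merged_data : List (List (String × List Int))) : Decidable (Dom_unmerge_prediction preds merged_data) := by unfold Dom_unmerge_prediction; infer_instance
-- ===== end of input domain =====

-- B replaces A's flat (id, pred) pair list + full stable sort by id-keyed buckets
-- accumulated in one dict pass, concatenated over the sorted distinct ids (objective: alternative).

-- md["id"]: first-match lookup of the key "id" in the association list (shared by both ports; Pre_ guarantees it hits)
def pvIdsOf (md : List (String × List Int)) : List Int :=
  ((md.find? (fun p => p.1 == "id")).map (fun p => p.2)).getD []

-- ===== PORT A =====
def unmerge_prediction (preds : List Int) (merged_data : List (List (String × List Int))) : List Int :=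
  let preds_with_ids : List (Int × Int) :=
    (preds.zip merged_data).foldl
      (fun acc x => (pvIdsOf x.2).foldl (fun acc i => acc ++ [(i, x.1)]) acc) []
  (PySem.List.sorted preds_with_ids (fun q => q.1)).map (fun q => q.2)

-- ===== PORT B =====
def unmerge_prediction_alt (preds : List Int) (merged_data : List (List (String × List Int))) : List Int :=
  let buckets : PySem.Dict Int (List Int) :=
    (preds.zip merged_data).foldl
      (fun d x => (pvIdsOf x.2).foldl (fun d i => d.modify i [] (fun b => b ++ [x.1])) d)
      PySem.Dict.empty
  (PySem.List.sorted buckets.keys (fun k => k)).foldl (fun out k => out ++ buckets.getD k []) []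

-- ===== PRECONDITION & SPEC =====
-- Pre_ excludes exactly the inputs where the Python A raises: AssertionError when the
-- lengths differ, KeyError when some merged record lacks the "id" key.
def Pre_unmerge_prediction (preds : List Int) (merged_data : List (List (String × List Int))) : Prop :=
  preds.length = merged_data.length ∧
  ∀ md ∈ merged_data, (md.find? (fun p => p.1 == "id")).isSome
instance (preds : List Int) (merged_data : List (List (String × List Int))) : Decidable (Pre_unmerge_prediction preds merged_data) := by unfold Pre_unmerge_prediction; infer_instance

def pvWitness_unmerge_prediction : List Int × (List (List (String × List Int))) :=
  ([7, -2], [[("id", [3, 0])], [("id", [1, 3])]])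

def Spec_unmerge_prediction (preds : List Int) (merged_data : List (List (String × List Int))) (out : List Int) : Prop := out = unmerge_prediction_alt preds merged_data
instance (preds : List Int) (merged_data : List (List (String × List Int))) (out : List Int) : Decidable (Spec_unmerge_prediction preds merged_data out) := by unfold Spec_unmerge_prediction; infer_instance

-- ===== CLAIM (what is proved, stated in full; the proofs are below) =====
def Claim_equal_unmerge_prediction : Prop := ∀ (preds : List Int) (merged_data : List (List (String × List Int))), Dom_unmerge_prediction preds merged_data → Pre_unmerge_prediction preds merged_data → Spec_unmerge_prediction preds merged_data (unmerge_prediction preds merged_data)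

-- ===== LEMMAS AND PROOFS =====

-- insertBy puts x in front when x goes before every element
lemma insertBy_all_before {α : Type} (b : α → α → Bool) (x : α) (l : List α)
    (h : ∀ y ∈ l, b x y = true) : PySem.List.insertBy b x l = x :: l := by
  cases l with
  | nil => rfl
  | cons y ys => simp [PySem.List.insertBy, h y (List.mem_cons_self)]

-- insertBy skips a prefix x goes after
lemma insertBy_append_left {α : Type} (b : α → α → Bool) (x : α) (ys zs : List α)
    (h : ∀ y ∈ ys, b x y = false) :
    PySem.List.insertBy b x (ys ++ zs) = ys ++ PySem.List.insertBy b x zs := by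
  induction ys with
  | nil => rfl
  | cons y t ih =>
      simp only [List.cons_append, PySem.List.insertBy, h y (List.mem_cons_self)]
      simp only [Bool.false_eq_true, if_false, List.cons.injEq, true_and]
      exact ih (fun y hy => h y (List.mem_cons_of_mem _ hy))

-- inserting one keyed pair into a bucket-grouped flat list = appending it to its id's bucket
lemma insertBy_flatMap_grouped (ks : List Int) (grp : Int → List (Int × Int)) (i p : Int)
    (hks : ks.Pairwise (· < ·))
    (hg : ∀ k, ∀ q ∈ grp k, q.1 = k)
    (hi : i ∉ ks → grp i = []) :
    PySem.List.insertBy (fun a b => decide (a.1 < b.1)) (i, p) (ks.flatMap grp)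
    = (if i ∈ ks then ks else PySem.List.insertBy (fun a b => decide (a < b)) i ks).flatMap
        (fun k => if k = i then grp k ++ [(i, p)] else grp k) := by
  induction ks with
  | nil =>
      simp only [List.flatMap_nil, List.not_mem_nil, if_neg (fun h => h)]
      simp [PySem.List.insertBy, hi (by simp)]
  | cons k t ih =>
      have hkt : ∀ y ∈ t, k < y := fun y hy => List.rel_of_pairwise_cons hks hy
      have ht : t.Pairwise (· < ·) := hks.of_cons
      by_cases hik : i = k
      · subst hik
        have hmem : i ∈ i :: t := List.mem_cons_self
        rw [if_pos hmem]
        have h1 : ∀ y ∈ grp i, (fun a b : Int × Int => decide (a.1 < b.1)) (i, p) y = false := by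
          intro y hy; simp [hg i y hy]
        have h2 : ∀ y ∈ t.flatMap grp, (fun a b : Int × Int => decide (a.1 < b.1)) (i, p) y = true := by
          intro y hy
          rcases List.mem_flatMap.mp hy with ⟨k', hk', hyk'⟩
          simp [hg k' y hyk', hkt k' hk']
        rw [List.flatMap_cons, insertBy_append_left _ _ _ _ h1, insertBy_all_before _ _ _ h2,
            List.flatMap_cons, if_pos rfl]
        have : (fun k => if k = i then grp k ++ [(i, p)] else grp k) = fun k' =>
            if k' = i then grp k' ++ [(i, p)] else grp k' := rfl
        have htgrp : t.flatMap (fun k' => if k' = i then grp k' ++ [(i, p)] else grp k') = t.flatMap grp := by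
          apply List.flatMap_congr  -- may not exist; fallback below
          intro k' hk'
          have : k' ≠ i := by have := hkt k' hk'; omega
          simp [this]
        rw [htgrp]; simp
      · rcases lt_or_gt_of_ne (fun h => hik h) with hlt | hgt
        · -- i < k : i goes in front of everything
          have hnot : i ∉ k :: t := by
            intro hmem
            rcases List.mem_cons.mp hmem with h | h
            · exact hik h
            · have := hkt i h; omega
          rw [if_neg hnot]
          have h2 : ∀ y ∈ (k :: t).flatMap grp, (fun a b : Int × Int => decide (a.1 < b.1)) (i, p) y = true := by
            intro y hy
            rcases List.mem_flatMap.mp hy with ⟨k', hk', hyk'⟩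
            have hk'ge : i < k' := by
              rcases List.mem_cons.mp hk' with h | h
              · omega
              · have := hkt k' h; omega
            simp [hg k' y hyk', hk'ge]
          rw [insertBy_all_before _ _ _ h2]
          have hins : PySem.List.insertBy (fun a b : Int => decide (a < b)) i (k :: t) = i :: k :: t := by
            simp [PySem.List.insertBy, hlt]
          rw [hins]
          have hgrpeq : (k :: t).flatMap (fun k' => if k' = i then grp k' ++ [(i, p)] else grp k')
              = (k :: t).flatMap grp := by
            apply List.flatMap_congr
            intro k' hk'
            have : k' ≠ i := by
              rcases List.mem_cons.mp hk' with h | h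
              · omega
              · have := hkt k' h; omega
            simp [this]
          simp [List.flatMap_cons, hgrpeq, hi hnot]
        · -- k < i : skip bucket k and recurse
          have h1 : ∀ y ∈ grp k, (fun a b : Int × Int => decide (a.1 < b.1)) (i, p) y = false := by
            intro y hy; simp [hg k y hy]; omega
          rw [List.flatMap_cons, insertBy_append_left _ _ _ _ h1]
          have hi' : i ∉ t → grp i = [] := by
            intro h; exact hi (by simp [List.mem_cons, hik, h])
          rw [ih ht hi']
          have hmemiff : (i ∈ k :: t) = (i ∈ t) := by
            simp [List.mem_cons, hik]
          by_cases hit : i ∈ t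
          · rw [if_pos hit, if_pos (List.mem_cons_of_mem _ hit), List.flatMap_cons]
            have : k ≠ i := fun h => hik h.symm
            rw [if_neg this]
          · rw [if_neg hit, if_neg (by simp [List.mem_cons, hik, hit])]
            have hins : PySem.List.insertBy (fun a b : Int => decide (a < b)) i (k :: t)
                = k :: PySem.List.insertBy (fun a b : Int => decide (a < b)) i t := by
              simp [PySem.List.insertBy]; omega
            rw [hins, List.flatMap_cons]
            have : k ≠ i := fun h => hik h.symm
            rw [if_neg this]

-- the stable sort of keyed pairs is the concatenation, over sorted distinct keys, of the key's pairs in input order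
lemma sorted_pairs_grouped (P : List (Int × Int)) :
    PySem.List.sorted P (fun q => q.1)
    = (PySem.List.sorted (PySem.Set.ofList (P.map (fun q => q.1))) (fun k => k)).flatMap
        (fun k => P.filter (fun q => q.1 == k)) := by
  induction P using List.reverseRecOn with
  | nil => rfl
  | append_singleton P x ih =>
      obtain ⟨i, p⟩ := x
      have hsorted : PySem.List.sorted (P ++ [(i, p)]) (fun q => q.1)
          = PySem.List.insertBy (fun a b => decide (a.1 < b.1)) (i, p)
              (PySem.List.sorted P (fun q => q.1)) := by
        rw [PySem.List.sorted_eq_foldl_insertBy, PySem.List.sorted_eq_foldl_insertBy,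
            List.foldl_append, List.foldl_cons, List.foldl_nil]
      set ids := P.map (fun q => q.1) with hids
      set ks := PySem.List.sorted (PySem.Set.ofList ids) (fun k => k) with hks
      have hkspw : ks.Pairwise (· < ·) := PySem.List.sorted_ofList_pairwise_lt ids
      have hg : ∀ k, ∀ q ∈ P.filter (fun q => q.1 == k), q.1 = k := by
        intro k q hq
        have := (List.mem_filter.mp hq).2
        exact by simpa using this
      have hmemks : ∀ k : Int, k ∈ ks ↔ k ∈ ids := by
        intro k
        rw [hks, PySem.List.mem_sorted, PySem.Set.mem_ofList]
      have hi : i ∉ ks → P.filter (fun q => q.1 == i) = [] := by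
        intro h
        rw [List.filter_eq_nil_iff]
        intro q hq hbeq
        exact h ((hmemks i).mpr (by
          rw [hids]
          exact List.mem_map.mpr ⟨q, hq, by simpa using hbeq⟩))
      rw [hsorted, ih, insertBy_flatMap_grouped ks _ i p hkspw hg hi]
      -- buckets for P ++ [(i,p)]
      have hbuck : (fun k => (P ++ [(i, p)]).filter (fun q => q.1 == k))
          = fun k => if k = i then P.filter (fun q => q.1 == k) ++ [(i, p)]
                     else P.filter (fun q => q.1 == k) := by
        funext k
        rw [List.filter_append]
        by_cases hk : k = i
        · subst hk; simp
        · simp [Ne.symm hk, hk]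
      -- key set for P ++ [(i,p)]
      have hmap : (P ++ [(i, p)]).map (fun q => q.1) = ids ++ [i] := by simp [hids]
      have hofl : PySem.Set.ofList (ids ++ [i]) = PySem.Set.add (PySem.Set.ofList ids) i := by
        rw [PySem.Set.ofList_eq_foldl, PySem.Set.ofList_eq_foldl, List.foldl_append,
            List.foldl_cons, List.foldl_nil]
      rw [hmap, hbuck, hofl]
      by_cases hmem : i ∈ ks
      · have hc : PySem.Set.contains (PySem.Set.ofList ids) i = true :=
          List.elem_eq_true_of_mem ((PySem.Set.mem_ofList ids i).mpr ((hmemks i).mp hmem))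
        rw [if_pos hmem]
        have : PySem.Set.add (PySem.Set.ofList ids) i = PySem.Set.ofList ids := by
          simp [PySem.Set.add]
          exact (hmemks i).mp hmem
        rw [this, ← hks]
      · have hc : PySem.Set.contains (PySem.Set.ofList ids) i = false := by
          rcases h : PySem.Set.contains (PySem.Set.ofList ids) i with _ | _
          · rfl
          · exact absurd ((hmemks i).mpr ((PySem.Set.mem_ofList ids i).mp (List.mem_of_elem_eq_true h))) hmem
        rw [if_neg hmem]
        have hadd : PySem.Set.add (PySem.Set.ofList ids) i = PySem.Set.ofList ids ++ [i] := by
          simp [PySem.Set.add]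
          exact fun h => hmem ((hmemks i).mpr h)
        rw [hadd]
        have : PySem.List.sorted (PySem.Set.ofList ids ++ [i]) (fun k => k)
            = PySem.List.insertBy (fun a b : Int => decide (a < b)) i ks := by
          rw [hks, PySem.List.sorted_eq_foldl_insertBy, PySem.List.sorted_eq_foldl_insertBy,
              List.foldl_append, List.foldl_cons, List.foldl_nil]
        rw [this]

-- the flat pair list both ports traverse
def pvPairs (preds : List Int) (merged_data : List (List (String × List Int))) : List (Int × Int) :=
  (preds.zip merged_data).flatMap (fun x => (pvIdsOf x.2).map (fun i => (i, x.1)))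

lemma portA_eq (preds : List Int) (merged_data : List (List (String × List Int))) :
    unmerge_prediction preds merged_data
    = (PySem.List.sorted (pvPairs preds merged_data) (fun q => q.1)).map (fun q => q.2) := by
  have hfold : ∀ (l : List (Int × List (String × List Int))) (acc : List (Int × Int)),
      l.foldl (fun acc x => (pvIdsOf x.2).foldl (fun acc i => acc ++ [(i, x.1)]) acc) acc
      = acc ++ l.flatMap (fun x => (pvIdsOf x.2).map (fun i => (i, x.1))) := by
    intro l
    induction l with
    | nil => simp
    | cons x t ih =>
        intro acc
        rw [List.foldl_cons, List.flatMap_cons, ih, PySem.List.foldl_append_singleton_eq_map]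
        simp
  show (PySem.List.sorted
      ((preds.zip merged_data).foldl
        (fun acc x => (pvIdsOf x.2).foldl (fun acc i => acc ++ [(i, x.1)]) acc) [])
      (fun q => q.1)).map (fun q => q.2)
    = (PySem.List.sorted (pvPairs preds merged_data) (fun q => q.1)).map (fun q => q.2)
  rw [hfold, List.nil_append]
  rfl

lemma portB_dict (preds : List Int) (merged_data : List (List (String × List Int))) :
    (preds.zip merged_data).foldl
      (fun d x => (pvIdsOf x.2).foldl (fun d i => d.modify i [] (fun b => b ++ [x.1])) d)
      PySem.Dict.empty
    = (pvPairs preds merged_data).foldl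
        (fun d p => d.modify p.1 [] (fun b => b ++ [p.2])) PySem.Dict.empty := by
  unfold pvPairs
  rw [List.foldl_flatMap]
  congr 1
  funext d x
  rw [List.foldl_map]

lemma portB_eq (preds : List Int) (merged_data : List (List (String × List Int))) :
    unmerge_prediction_alt preds merged_data
    = (PySem.List.sorted (PySem.Set.ofList ((pvPairs preds merged_data).map (fun q => q.1)))
        (fun k => k)).flatMap
        (fun k => ((pvPairs preds merged_data).filter (fun q => q.1 == k)).map (fun q => q.2)) := by
  show (PySem.List.sorted
      ((preds.zip merged_data).foldl
        (fun d x => (pvIdsOf x.2).foldl (fun d i => d.modify i [] (fun b => b ++ [x.1])) d)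
        PySem.Dict.empty).keys (fun k => k)).foldl
      (fun out k => out ++ ((preds.zip merged_data).foldl
        (fun d x => (pvIdsOf x.2).foldl (fun d i => d.modify i [] (fun b => b ++ [x.1])) d)
        PySem.Dict.empty).getD k []) []
    = _
  rw [portB_dict]
  set P := pvPairs preds merged_data with hP
  have hkeys : (P.foldl (fun d p => d.modify p.1 [] (fun b => b ++ [p.2])) PySem.Dict.empty).keys
      = PySem.Set.ofList (P.map (fun q => q.1)) := by
    rw [PySem.Dict.keys_foldl_modify_key P (fun p => p.1) [] (fun _ p => fun b => b ++ [p.2])]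
    rw [PySem.Set.ofList_eq_foldl]
    rfl
  have hgetD : ∀ k, (P.foldl (fun d p => d.modify p.1 [] (fun b => b ++ [p.2]))
        PySem.Dict.empty).getD k []
      = (P.filter (fun q => q.1 == k)).map (fun q => q.2) := by
    intro k
    rw [PySem.Dict.getD_foldl_modify_append]
    simp
  rw [hkeys]
  rw [PySem.List.foldl_append_eq_flatMap]
  simp only [List.nil_append]
  apply List.flatMap_congr
  intro k _
  exact hgetD k

-- ===== VERDICT (by name: the statement is the Claim_ definition above) =====
theorem unmerge_prediction_spec : Claim_equal_unmerge_prediction := by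
  intro preds merged_data _ _
  unfold Spec_unmerge_prediction
  rw [portA_eq, portB_eq, sorted_pairs_grouped]
  rw [List.map_flatMap]
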